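-- pv_equiv track=rewrite | github.com/Nirmalk903/trade_analytics | news_heasines.py | _derive_event_action
-- ===== SOURCE A (Python) =====
-- EVENT_KEYWORDS = [
--     "earnings", "results", "board meeting", "agm", "egm", "investor meet",
-- ]
--
-- ACTION_KEYWORDS = [
--     "dividend", "split", "bonus", "buyback", "rights issue", "merger", "demerger",
-- ]
--
-- def _derive_event_action(items: list[dict]) -> tuple[str, str, str, str]:
--     event = ""
--     event_date = ""
--     action = ""
--     action_date = ""
--
--     for item in items:
--         title = f"{item.get('title', '')} {item.get('summary', '')}".lower()
--         published = item.get("published", "")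
--
--         if not event and any(k in title for k in EVENT_KEYWORDS):
--             event = "Event"
--             event_date = published
--
--         if not action and any(k in title for k in ACTION_KEYWORDS):
--             action = "Corporate Action"
--             action_date = published
--
--         if event and action:
--             break
--
--     return event, event_date, action, action_date
-- ===== SOURCE B (Python) =====
-- EVENT_KEYWORDS = [
--     "earnings", "results", "board meeting", "agm", "egm", "investor meet",
-- ]
--
-- ACTION_KEYWORDS = [
--     "dividend", "split", "bonus", "buyback", "rights issue", "merger", "demerger",
-- ]
--
--
-- def _matches(item, keywords):
--     text = f"{item.get('title', '')} {item.get('summary', '')}".lower()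
--     return any(k in text for k in keywords)
--
--
-- def _derive_event_action(items: list[dict]) -> tuple[str, str, str, str]:
--     ev_item = next((it for it in items if _matches(it, EVENT_KEYWORDS)), None)
--     ac_item = next((it for it in items if _matches(it, ACTION_KEYWORDS)), None)
--     event, event_date = ("Event", ev_item.get("published", "")) if ev_item is not None else ("", "")
--     action, action_date = ("Corporate Action", ac_item.get("published", "")) if ac_item is not None else ("", "")
--     return event, event_date, action, action_date
-- ===== Notes on version B (the rewrite author's own statement) =====
-- stated objective: alternative
-- what changed: Replaces A's single fused loop with interleaved state and an early break by two independent first-match searches (next over a generator per keyword set), then assembles the four fields from the two optional hits.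
import Mathlib
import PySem

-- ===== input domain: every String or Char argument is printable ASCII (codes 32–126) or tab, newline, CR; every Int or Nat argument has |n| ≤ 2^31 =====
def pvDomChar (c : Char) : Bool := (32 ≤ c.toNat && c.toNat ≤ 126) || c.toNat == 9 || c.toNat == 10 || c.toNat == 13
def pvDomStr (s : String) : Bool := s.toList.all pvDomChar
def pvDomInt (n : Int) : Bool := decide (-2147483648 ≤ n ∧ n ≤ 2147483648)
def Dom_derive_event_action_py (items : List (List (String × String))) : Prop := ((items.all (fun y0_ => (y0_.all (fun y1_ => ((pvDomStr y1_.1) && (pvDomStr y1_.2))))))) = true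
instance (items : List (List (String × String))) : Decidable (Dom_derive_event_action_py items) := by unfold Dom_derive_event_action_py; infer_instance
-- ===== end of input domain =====

-- B replaces A's fused early-exit loop by two independent first-match searches; same return value, no speed claim.
-- ===== PORT A =====
def pvEventKws : List String :=
  ["earnings", "results", "board meeting", "agm", "egm", "investor meet"]

def pvActionKws : List String :=
  ["dividend", "split", "bonus", "buyback", "rights issue", "merger", "demerger"]

-- f"{item.get('title','')} {item.get('summary','')}".lower(), as a list of chars
def pvTitle (item : List (String × String)) : List Char :=
  PySem.Chars.lower ((PySem.Dict.getD ⟨item⟩ "title" "").toList ++ ' ' :: (PySem.Dict.getD ⟨item⟩ "summary" "").toList)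

-- any(k in title for k in kws)
def pvMatches (item : List (String × String)) (kws : List String) : Bool :=
  kws.any (fun k => PySem.Chars.isIn k.toList (pvTitle item))

def pvPublished (item : List (String × String)) : String :=
  PySem.Dict.getD ⟨item⟩ "published" ""

-- A's loop: state ((event, event_date), (action, action_date)), early break when both set
def pvLoopA (st : (String × String) × (String × String)) (items : List (List (String × String))) :
    String × String × String × String :=
  match items with
  | [] => (st.1.1, st.1.2, st.2.1, st.2.2)
  | item :: rest =>
    let st1 := if st.1.1 == "" && pvMatches item pvEventKws then ("Event", pvPublished item) else st.1
    let st2 := if st.2.1 == "" && pvMatches item pvActionKws then ("Corporate Action", pvPublished item) else st.2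
    if st1.1 ≠ "" ∧ st2.1 ≠ "" then (st1.1, st1.2, st2.1, st2.2) else pvLoopA (st1, st2) rest

def derive_event_action_py (items : List (List (String × String))) : String × String × String × String :=
  pvLoopA (("", ""), ("", "")) items

-- ===== PORT B =====
-- next((it for it in items if _matches(it, kws)), None), projected to its 'published' field
def pvFirstMatch (kws : List String) (items : List (List (String × String))) : Option String :=
  match items with
  | [] => none
  | item :: rest => if pvMatches item kws then some (pvPublished item) else pvFirstMatch kws rest

def derive_event_action_py_alt (items : List (List (String × String))) : String × String × String × String :=
  let e := match pvFirstMatch pvEventKws items with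
           | some p => ("Event", p)
           | none => ("", "")
  let a := match pvFirstMatch pvActionKws items with
           | some p => ("Corporate Action", p)
           | none => ("", "")
  (e.1, e.2, a.1, a.2)

-- ===== PRECONDITION & SPEC =====
def Spec_derive_event_action_py (items : List (List (String × String))) (out : String × String × String × String) : Prop := out = derive_event_action_py_alt items
instance (items : List (List (String × String))) (out : String × String × String × String) : Decidable (Spec_derive_event_action_py items out) := by unfold Spec_derive_event_action_py; infer_instance

-- ===== CLAIM (what is proved, stated in full; the proofs are below) =====
def Claim_equal_derive_event_action_py : Prop := ∀ (items : List (List (String × String))), Dom_derive_event_action_py items → Spec_derive_event_action_py items (derive_event_action_py items)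

-- ===== LEMMAS AND PROOFS =====

-- A's per-field update, given the first-match result of the remaining scan
def pvMerge (lbl ev evd : String) (o : Option String) : String × String :=
  if ev == "" then
    match o with
    | some p => (lbl, p)
    | none => (ev, evd)
  else (ev, evd)

theorem pvLoopA_eq (items : List (List (String × String))) :
    ∀ ev evd ac acd,
      pvLoopA ((ev, evd), (ac, acd)) items =
        (let e := pvMerge "Event" ev evd (pvFirstMatch pvEventKws items)
         let a := pvMerge "Corporate Action" ac acd (pvFirstMatch pvActionKws items)
         (e.1, e.2, a.1, a.2)) := by
  induction items with
  | nil =>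
    intro ev evd ac acd
    simp [pvLoopA, pvFirstMatch, pvMerge]
  | cons item rest ih =>
    intro ev evd ac acd
    simp only [pvLoopA, pvFirstMatch]
    by_cases hev : ev = ""
    · by_cases hme : pvMatches item pvEventKws
      · by_cases hac : ac = ""
        · by_cases hma : pvMatches item pvActionKws
          · simp [hev, hme, hac, hma, pvMerge]
          · simp [hev, hme, hac, hma, pvMerge, ih]
        · simp [hev, hme, hac, pvMerge]
      · by_cases hac : ac = ""
        · by_cases hma : pvMatches item pvActionKws
          · simp [hev, hme, hac, hma, pvMerge, ih]
          · simp [hev, hme, hac, hma, pvMerge, ih]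
        · simp [hev, hme, hac, pvMerge, ih]
    · by_cases hac : ac = ""
      · by_cases hma : pvMatches item pvActionKws
        · simp [hev, hac, hma, pvMerge]
        · simp [hev, hac, hma, pvMerge, ih]
      · simp [hev, hac, pvMerge]

-- ===== VERDICT (by name: the statement is the Claim_ definition above) =====
theorem derive_event_action_py_spec : Claim_equal_derive_event_action_py := by
  intro items _
  unfold Spec_derive_event_action_py derive_event_action_py derive_event_action_py_alt
  rw [pvLoopA_eq]
  simp [pvMerge]
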